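-- pv_equiv track=rewrite | github.com/alankrit03/Problem_Solving | end_sort.py | check
-- ===== SOURCE A (Python) =====
-- def check(arr, k):
--     lst=[]
--     k_status=False
--     for i in range(k,len(arr)):
--         for j in range(i+1,len(arr)):
--             if arr[i]>arr[j]:
--                 lst.append(arr[i])
--                 if i==k:
--                     k_status=True
--     return arr.index(min(lst)),k_status
-- ===== SOURCE B (Python) =====
-- def check(arr, k):
--     # One right-to-left pass maintaining the suffix minimum (O(n) vs A's O(n^2)).
--     n = len(arr)
--     suffmin = arr[n - 1]
--     best = None
--     k_status = False
--     for i in range(n - 2, k - 1, -1):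
--         v = arr[i]
--         if v > suffmin:
--             if best is None or v < best:
--                 best = v
--             if i == k:
--                 k_status = True
--         if v < suffmin:
--             suffmin = v
--     return arr.index(best), k_status
-- ===== Notes on version B (the rewrite author's own statement) =====
-- stated objective: faster
-- what changed: Replaced the nested i/j scan (every pair compared) by a single right-to-left pass that maintains the running suffix minimum, marking an index as qualifying exactly when its value exceeds the suffix minimum and keeping the least qualifying value.
-- outside the precondition, e.g. on check([1, 2, 3], 0): A raises ValueError, B raises ValueError; on check([3, 1, 2], -3): A returns (2, True), B returns (2, True)
import Mathlib
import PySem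

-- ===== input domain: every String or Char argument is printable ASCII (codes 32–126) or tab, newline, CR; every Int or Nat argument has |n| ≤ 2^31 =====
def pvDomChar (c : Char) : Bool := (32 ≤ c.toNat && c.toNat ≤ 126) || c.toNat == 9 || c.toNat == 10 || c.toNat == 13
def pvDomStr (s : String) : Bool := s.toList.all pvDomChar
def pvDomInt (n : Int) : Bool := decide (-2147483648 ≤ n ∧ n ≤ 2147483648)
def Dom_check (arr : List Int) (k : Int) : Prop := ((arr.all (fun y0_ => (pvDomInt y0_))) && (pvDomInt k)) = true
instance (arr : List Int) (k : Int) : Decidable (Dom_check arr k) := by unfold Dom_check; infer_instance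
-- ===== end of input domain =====

-- B replaces A's nested O(n^2) pair scan by a single right-to-left pass keeping the running
-- suffix minimum (objective: faster, asymptotic). Return-value equivalence on Pre_check.

-- ===== PORT A =====
def check (arr : List Int) (k : Int) : Int × Bool :=
  -- lst=[]; k_status=False; nested for-loops appending arr[i] on each inversion
  let n : Int := arr.length
  let st := (PySem.List.pyRange k n 1).foldl (fun (st : List Int × Bool) i =>
      (PySem.List.pyRange (i+1) n 1).foldl (fun (st : List Int × Bool) j =>
        if PySem.List.pyGetD arr i 0 > PySem.List.pyGetD arr j 0 then
          (st.1 ++ [PySem.List.pyGetD arr i 0], if i == k then true else st.2)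
        else st) st) ([], false)
  -- return arr.index(min(lst)), k_status   (min([]) raises: excluded by Pre_check)
  let m := (PySem.List.min? st.1 (fun y => y)).getD 0
  (((PySem.List.index? arr m).map (Int.ofNat)).getD 0, st.2)

-- ===== PORT B =====
def check_alt (arr : List Int) (k : Int) : Int × Bool :=
  let n : Int := arr.length
  let st := (PySem.List.pyRange (n-2) (k-1) (-1)).foldl
    (fun (st : Int × Option Int × Bool) i =>
      let v := PySem.List.pyGetD arr i 0
      let best := if v > st.1 then
          (match st.2.1 with
           | none => some v
           | some b => if v < b then some v else some b)
        else st.2.1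
      let ks := if v > st.1 && i == k then true else st.2.2
      let sm := if v < st.1 then v else st.1
      (sm, best, ks))
    (PySem.List.pyGetD arr (n-1) 0, none, false)
  (((PySem.List.index? arr ((st.2.1).getD 0)).map (Int.ofNat)).getD 0, st.2.2)

-- ===== PRECONDITION & SPEC =====
-- Pre_check excludes (a) inputs where arr[k:] has no inversion, on which A's min([]) raises
-- ValueError (B's arr.index(None) raises ValueError there too), and (b) negative k, which is
-- outside the task's natural domain (A then re-scans part of the array via negative-index
-- wraparound).
def Pre_check (arr : List Int) (k : Int) : Prop :=
  0 ≤ k ∧ ¬ List.IsChain (· ≤ ·) (arr.drop k.toNat)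
instance (arr : List Int) (k : Int) : Decidable (Pre_check arr k) := by
  unfold Pre_check; infer_instance
def pvWitness_check : List Int × Int := ([2, 1], 0)
def Spec_check (arr : List Int) (k : Int) (out : Int × Bool) : Prop := out = check_alt arr k
instance (arr : List Int) (k : Int) (out : Int × Bool) : Decidable (Spec_check arr k out) := by unfold Spec_check; infer_instance

-- ===== CLAIM (what is proved, stated in full; the proofs are below) =====
def Claim_equal_check : Prop := ∀ (arr : List Int) (k : Int), Dom_check arr k → Pre_check arr k → Spec_check arr k (check arr k)

-- ===== LEMMAS AND PROOFS =====

-- Values of A's lst: each arr[i] repeated once per later smaller element.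
def invVals : List Int → List Int
  | [] => []
  | x :: xs => List.replicate (xs.countP (fun y => decide (x > y))) x ++ invVals xs

-- min(l) as an Option, in A's running-fold form.
def minv : List Int → Option Int
  | [] => none
  | x :: xs => some (xs.foldl min x)

-- B's loop state (suffix minimum, best qualifying value) over a suffix of arr.
def bstate : List Int → Int × Option Int
  | [] => (0, none)
  | [x] => (x, none)
  | x :: y :: t =>
      let p := bstate (y :: t)
      (if x < p.1 then x else p.1,
       if x > p.1 then
         (match p.2 with
          | none => some x
          | some b => if x < b then some x else some b)
       else p.2)

lemma foldl_min_distrib (t : List Int) : ∀ a b : Int, t.foldl min (min a b) = min a (t.foldl min b) := by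
  induction t with
  | nil => intro a b; simp
  | cons v t ih =>
    intro a b
    simp only [List.foldl_cons]
    rw [min_assoc, ih]

lemma foldl_min_replicate (m : Nat) (x : Int) (r : List Int) :
    (List.replicate m x ++ r).foldl min x = r.foldl min x := by
  induction m with
  | zero => simp
  | succ m ih => simpa [List.replicate_succ] using ih

lemma min?_eq_minv (l : List Int) : PySem.List.min? l (fun y => y) = minv l := by
  cases l with
  | nil => simp [PySem.List.min?, minv]
  | cons x xs => rw [PySem.List.min?_id_cons]; rfl

lemma bstate_fst (d : List Int) (hd : d ≠ []) :
    (bstate d).1 ∈ d ∧ ∀ y ∈ d, (bstate d).1 ≤ y := by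
  induction d with
  | nil => exact absurd rfl hd
  | cons x xs ih =>
    cases xs with
    | nil => simp [bstate]
    | cons y t =>
      obtain ⟨hmem, hmin⟩ := ih (by simp)
      constructor
      · by_cases h : x < (bstate (y :: t)).1
        · simp [bstate, h]
        · simp only [bstate, if_neg h]
          exact List.mem_cons_of_mem _ hmem
      · intro z hz
        rcases List.mem_cons.mp hz with rfl | hz
        · by_cases h : z < (bstate (y :: t)).1
          · simp [bstate, h]
          · simp only [bstate, if_neg h]; omega
        · by_cases h : x < (bstate (y :: t)).1
          · simp only [bstate, if_pos h]
            exact le_trans (le_of_lt h) (hmin z hz)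
          · simp only [bstate, if_neg h]
            exact hmin z hz

lemma gt_bstate_iff (x : Int) (d : List Int) (hd : d ≠ []) :
    (x > (bstate d).1) ↔ ∃ y ∈ d, x > y := by
  obtain ⟨hmem, hmin⟩ := bstate_fst d hd
  constructor
  · intro h; exact ⟨_, hmem, h⟩
  · rintro ⟨y, hy, hxy⟩; exact lt_of_le_of_lt (hmin y hy) hxy

lemma minv_invVals (d : List Int) : minv (invVals d) = (bstate d).2 := by
  induction d with
  | nil => rfl
  | cons x xs ih =>
    cases xs with
    | nil => rfl
    | cons y t =>
      have hne : (y :: t) ≠ [] := by simp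
      by_cases h : x > (bstate (y :: t)).1
      · have hex : ∃ z ∈ (y :: t), x > z := (gt_bstate_iff x _ hne).mp h
        have hc : 0 < (y :: t).countP (fun z => decide (x > z)) := by
          rw [List.countP_pos_iff]
          obtain ⟨z, hz, hxz⟩ := hex
          exact ⟨z, hz, by simpa using hxz⟩
        obtain ⟨m, hm⟩ : ∃ m, (y :: t).countP (fun z => decide (x > z)) = m + 1 :=
          ⟨_, (Nat.succ_pred_eq_of_pos hc).symm⟩
        show minv (List.replicate _ x ++ invVals (y :: t)) = _
        rw [hm, List.replicate_succ]
        simp only [List.cons_append, minv]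
        rw [foldl_min_replicate]
        simp only [bstate, if_pos h]
        cases hb : (bstate (y :: t)).2 with
        | none =>
          have hnil : invVals (y :: t) = [] := by
            cases hiv : invVals (y :: t) with
            | nil => rfl
            | cons a r =>
              have := ih
              rw [hiv, hb] at this
              simp [minv] at this
          simp [hnil]
        | some b =>
          have hbv : minv (invVals (y :: t)) = some b := by rw [ih, hb]
          cases hiv : invVals (y :: t) with
          | nil => rw [hiv] at hbv; simp [minv] at hbv
          | cons a r =>
            rw [hiv] at hbv
            simp only [minv, Option.some.injEq] at hbv
            show some ((a :: r).foldl min x) = if x < b then some x else some b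
            simp only [List.foldl_cons]
            rw [foldl_min_distrib, hbv]
            by_cases hxb : x < b
            · simp [min_eq_left (le_of_lt hxb), hxb]
            · simp [min_eq_right (not_lt.mp hxb), hxb]
      · have hnoex : ¬ ∃ z ∈ (y :: t), x > z := fun hex => h ((gt_bstate_iff x _ hne).mpr hex)
        have hc : (y :: t).countP (fun z => decide (x > z)) = 0 := by
          rw [List.countP_eq_zero]
          intro z hz
          simp only [decide_eq_true_eq]
          intro hxz
          exact hnoex ⟨z, hz, hxz⟩
        show minv (List.replicate _ x ++ invVals (y :: t)) = _
        rw [hc]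
        simp only [List.replicate_zero, List.nil_append, ih]
        simp only [bstate, if_neg h]

-- A's inner loop over a value list: append x once per smaller value; set the flag if P and any.
lemma inner_fold (x : Int) (P : Bool) (ys : List Int) : ∀ (init : List Int × Bool),
    ys.foldl (fun st v => if x > v then (st.1 ++ [x], if P then true else st.2) else st) init
    = (init.1 ++ List.replicate (ys.countP (fun v => decide (x > v))) x,
       if P && ys.any (fun v => decide (x > v)) then true else init.2) := by
  induction ys with
  | nil => intro init; simp
  | cons v ys ih =>
    intro init
    simp only [List.foldl_cons, List.countP_cons, List.any_cons]
    by_cases h : x > v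
    · rw [if_pos h, ih]
      simp only [show (decide (x > v)) = true from by simpa using h, Prod.mk.injEq]
      constructor
      · rw [List.append_assoc]
        simp [List.replicate_succ]
      · cases P <;> simp
    · rw [if_neg h, ih]
      simp [show (decide (x > v)) = false from by simpa using h]

-- A's outer loop from an index a past k: appends invVals of the suffix, flag untouched.
lemma outer_tail (arr : List Int) (k : Int) :
    ∀ (m : Nat) (a : Int), 0 ≤ a → k < a → arr.length - a.toNat = m →
    ∀ init : List Int × Bool,
    (PySem.List.pyRange a (arr.length : Int) 1).foldl (fun (st : List Int × Bool) i =>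
      (PySem.List.pyRange (i+1) (arr.length : Int) 1).foldl (fun (st : List Int × Bool) j =>
        if PySem.List.pyGetD arr i 0 > PySem.List.pyGetD arr j 0 then
          (st.1 ++ [PySem.List.pyGetD arr i 0], if i == k then true else st.2)
        else st) st) init
    = (init.1 ++ invVals (arr.drop a.toNat), init.2) := by
  intro m
  induction m with
  | zero =>
    intro a ha0 hka hm init
    have hle : (arr.length : Int) ≤ a := by omega
    have hdrop : arr.drop a.toNat = [] := List.drop_eq_nil_of_le (by omega)
    rw [PySem.List.pyRange_one_eq_nil hle, hdrop]
    simp [invVals]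
  | succ m ih =>
    intro a ha0 hka hm init
    have halt : a < (arr.length : Int) := by omega
    have hanat : a.toNat < arr.length := by omega
    rw [PySem.List.pyRange_one_cons halt, List.foldl_cons]
    have hmap : (PySem.List.pyRange (a+1) (arr.length : Int) 1).foldl
        (fun (st : List Int × Bool) j =>
          if PySem.List.pyGetD arr a 0 > PySem.List.pyGetD arr j 0 then
            (st.1 ++ [PySem.List.pyGetD arr a 0], if a == k then true else st.2)
          else st) init
        = (arr.drop (a+1).toNat).foldl
            (fun (st : List Int × Bool) v =>
              if PySem.List.pyGetD arr a 0 > v then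
                (st.1 ++ [PySem.List.pyGetD arr a 0], if a == k then true else st.2)
              else st) init := by
      rw [← PySem.List.map_pyGetD_pyRange' arr 0 (by omega : (0:Int) ≤ a + 1), List.foldl_map]
    rw [hmap, inner_fold (PySem.List.pyGetD arr a 0) (a == k) (arr.drop (a+1).toNat) init]
    have hak : (a == k) = false := by
      rw [beq_eq_false_iff_ne]; omega
    rw [hak]
    simp only [Bool.false_and, Bool.false_eq_true, if_false]
    rw [ih (a+1) (by omega) (by omega) (by omega)
        (init.1 ++ List.replicate ((arr.drop (a+1).toNat).countP (fun v => decide (PySem.List.pyGetD arr a 0 > v))) (PySem.List.pyGetD arr a 0), init.2)]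
    have hget : PySem.List.pyGetD arr a 0 = arr[a.toNat] :=
      PySem.List.pyGetD_eq_getElem arr 0 ha0 halt
    have hnat1 : (a+1).toNat = a.toNat + 1 := by omega
    have hdrop : arr.drop a.toNat = arr[a.toNat] :: arr.drop (a.toNat + 1) :=
      List.drop_eq_getElem_cons hanat
    rw [hnat1, hget, hdrop]
    simp [invVals, List.append_assoc]

-- A in closed form: min over invVals of the suffix; flag = ∃ later smaller than arr[k].
lemma check_closed (arr : List Int) (k : Int) (hk : 0 ≤ k) :
    check arr k =
      (((PySem.List.index? arr ((minv (invVals (arr.drop k.toNat))).getD 0)).map Int.ofNat).getD 0,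
       match arr.drop k.toNat with
       | [] => false
       | x :: xs => xs.any (fun y => decide (x > y))) := by
  simp only [check]
  by_cases hkn : (arr.length : Int) ≤ k
  · have hdrop : arr.drop k.toNat = [] := List.drop_eq_nil_of_le (by omega)
    rw [PySem.List.pyRange_one_eq_nil hkn, hdrop]
    simp [invVals, min?_eq_minv, minv]
  · rw [not_le] at hkn
    have hknat : k.toNat < arr.length := by omega
    rw [PySem.List.pyRange_one_cons hkn, List.foldl_cons]
    have hmap : (PySem.List.pyRange (k+1) (arr.length : Int) 1).foldl
        (fun (st : List Int × Bool) j =>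
          if PySem.List.pyGetD arr k 0 > PySem.List.pyGetD arr j 0 then
            (st.1 ++ [PySem.List.pyGetD arr k 0], if k == k then true else st.2)
          else st) (([] : List Int), false)
        = (arr.drop (k+1).toNat).foldl
            (fun (st : List Int × Bool) v =>
              if PySem.List.pyGetD arr k 0 > v then
                (st.1 ++ [PySem.List.pyGetD arr k 0], if k == k then true else st.2)
              else st) (([] : List Int), false) := by
      rw [← PySem.List.map_pyGetD_pyRange' arr 0 (by omega : (0:Int) ≤ k + 1), List.foldl_map]
    rw [hmap, inner_fold (PySem.List.pyGetD arr k 0) (k == k) (arr.drop (k+1).toNat) (([] : List Int), false)]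
    rw [show (k == k) = true from beq_self_eq_true k]
    simp only [Bool.true_and, List.nil_append]
    rw [outer_tail arr k (arr.length - (k+1).toNat) (k+1) (by omega) (by omega) rfl]
    have hget : PySem.List.pyGetD arr k 0 = arr[k.toNat] :=
      PySem.List.pyGetD_eq_getElem arr 0 hk hkn
    have hnat1 : (k+1).toNat = k.toNat + 1 := by omega
    have hdrop : arr.drop k.toNat = arr[k.toNat] :: arr.drop (k.toNat + 1) :=
      List.drop_eq_getElem_cons hknat
    rw [hnat1, hget, hdrop]
    simp only [invVals, min?_eq_minv]
    cases hany : (arr.drop (k.toNat+1)).any (fun y => decide (arr[k.toNat] > y)) <;> simp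

-- Splitting B's countdown range at its smallest element.
lemma range_split (a b : Int) (h : a < b - 1) :
    PySem.List.pyRange (b - 2) (a - 1) (-1) = PySem.List.pyRange (b - 2) a (-1) ++ [a] := by
  rw [PySem.List.pyRange_neg_one_eq_reverse (b-2) (a-1),
      PySem.List.pyRange_neg_one_eq_reverse (b-2) a]
  have e1 : a - 1 + 1 = a := by ring
  have e2 : b - 2 + 1 = b - 1 := by ring
  rw [e1, e2]
  rw [PySem.List.pyRange_one_cons (by omega : a < b - 1), List.reverse_cons]

-- B's loop down to an index a past k computes bstate of the suffix; flag untouched.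
lemma b_loop (arr : List Int) (k : Int) :
    ∀ (m : Nat) (a : Int), 0 ≤ a → k < a → a ≤ (arr.length : Int) - 1 → arr.length - 1 - a.toNat = m →
    (PySem.List.pyRange ((arr.length : Int) - 2) (a - 1) (-1)).foldl
      (fun (st : Int × Option Int × Bool) i =>
        let v := PySem.List.pyGetD arr i 0
        let best := if v > st.1 then
            (match st.2.1 with
             | none => some v
             | some b => if v < b then some v else some b)
          else st.2.1
        let ks := if v > st.1 && i == k then true else st.2.2
        let sm := if v < st.1 then v else st.1
        (sm, best, ks))
      (PySem.List.pyGetD arr ((arr.length : Int) - 1) 0, none, false)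
    = ((bstate (arr.drop a.toNat)).1, (bstate (arr.drop a.toNat)).2, false) := by
  intro m
  induction m with
  | zero =>
    intro a ha0 hka hale hm
    have hlen : 1 ≤ arr.length := by omega
    have hae : a = (arr.length : Int) - 1 := by omega
    subst hae
    rw [PySem.List.pyRange_neg_one_eq_nil (by omega), List.foldl_nil]
    have hanat : ((arr.length : Int) - 1).toNat = arr.length - 1 := by omega
    have hlt : arr.length - 1 < arr.length := by omega
    have hdrop : arr.drop (((arr.length : Int) - 1).toNat) = [arr[arr.length - 1]] := by
      rw [hanat, List.drop_eq_getElem_cons hlt, List.drop_eq_nil_of_le (by omega)]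
    have hget : PySem.List.pyGetD arr ((arr.length : Int) - 1) 0 = arr[arr.length - 1] := by
      rw [PySem.List.pyGetD_eq_getElem arr 0 (by omega) (by omega)]
      congr 1
    rw [hdrop, hget]
    rfl
  | succ m ih =>
    intro a ha0 hka hale hm
    have halt : a < (arr.length : Int) - 1 := by omega
    have ihh := ih (a+1) (by omega) (by omega) (by omega) (by omega)
    rw [show a + 1 - 1 = a from by ring] at ihh
    rw [range_split a (arr.length : Int) halt, List.foldl_append, ihh]
    have hanat : a.toNat < arr.length := by omega
    have hnat1 : (a+1).toNat = a.toNat + 1 := by omega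
    have hget : PySem.List.pyGetD arr a 0 = arr[a.toNat] :=
      PySem.List.pyGetD_eq_getElem arr 0 ha0 (by omega)
    have hdrop : arr.drop a.toNat = arr[a.toNat] :: arr.drop (a.toNat + 1) :=
      List.drop_eq_getElem_cons hanat
    have hne : arr.drop (a.toNat + 1) ≠ [] := by
      intro hnil
      have := List.drop_eq_nil_iff.mp hnil
      omega
    obtain ⟨y, t, hyt⟩ : ∃ y t, arr.drop (a.toNat + 1) = y :: t := by
      cases h : arr.drop (a.toNat + 1) with
      | nil => exact absurd h hne
      | cons y t => exact ⟨y, t, rfl⟩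
    have hak : (a == k) = false := by rw [beq_eq_false_iff_ne]; omega
    simp only [List.foldl_cons, List.foldl_nil, hget, hak, Bool.and_false,
      Bool.false_eq_true, if_false]
    rw [hnat1, hdrop, hyt]
    simp only [bstate]

-- B in closed form (k below the last index).
lemma check_alt_closed (arr : List Int) (k : Int) (hk0 : 0 ≤ k) (hklt : k < (arr.length : Int) - 1) :
    check_alt arr k =
      (((PySem.List.index? arr (((bstate (arr.drop k.toNat)).2).getD 0)).map Int.ofNat).getD 0,
       decide (arr[k.toNat]'(by omega) > (bstate (arr.drop (k.toNat + 1))).1)) := by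
  simp only [check_alt]
  have hbl := b_loop arr k (arr.length - 1 - (k+1).toNat) (k+1) (by omega) (by omega) (by omega) rfl
  rw [show k + 1 - 1 = k from by ring] at hbl
  rw [range_split k (arr.length : Int) hklt, List.foldl_append, hbl]
  have hknat : k.toNat < arr.length := by omega
  have hnat1 : (k+1).toNat = k.toNat + 1 := by omega
  have hget : PySem.List.pyGetD arr k 0 = arr[k.toNat] :=
    PySem.List.pyGetD_eq_getElem arr 0 hk0 (by omega)
  have hdrop : arr.drop k.toNat = arr[k.toNat] :: arr.drop (k.toNat + 1) :=
    List.drop_eq_getElem_cons hknat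
  have hkk : (k == k) = true := beq_self_eq_true k
  simp only [List.foldl_cons, List.foldl_nil, hget, hkk, Bool.and_true]
  rw [hnat1, hdrop]
  cases h : arr.drop (k.toNat + 1) with
  | nil =>
    exfalso
    have := List.drop_eq_nil_iff.mp h
    omega
  | cons y t =>
    by_cases hgt : arr[k.toNat] > (bstate (y :: t)).1
    · simp [bstate, hgt]
    · simp [bstate, hgt]

theorem check_eq_alt (arr : List Int) (k : Int) (hk : 0 ≤ k)
    (hinv : ¬ List.IsChain (· ≤ ·) (arr.drop k.toNat)) :
    check arr k = check_alt arr k := by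
  have hlen2 : 2 ≤ (arr.drop k.toNat).length := by
    by_contra hle
    cases h : arr.drop k.toNat with
    | nil => rw [h] at hinv; exact hinv (by simp)
    | cons x xs =>
      cases xs with
      | nil => rw [h] at hinv; exact hinv (by simp)
      | cons y t => rw [h] at hle; simp at hle
  have hdl : (arr.drop k.toNat).length = arr.length - k.toNat := List.length_drop ..
  have hklt : k < (arr.length : Int) - 1 := by omega
  have hknat : k.toNat < arr.length := by omega
  rw [check_closed arr k hk, check_alt_closed arr k hk hklt, minv_invVals]
  have hdrop : arr.drop k.toNat = arr[k.toNat] :: arr.drop (k.toNat + 1) :=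
    List.drop_eq_getElem_cons hknat
  rw [hdrop]
  simp only [Prod.mk.injEq, true_and]
  have hne : arr.drop (k.toNat + 1) ≠ [] := by
    intro hnil
    rw [hdrop, hnil] at hlen2
    simp at hlen2
  by_cases hgt : arr[k.toNat] > (bstate (arr.drop (k.toNat + 1))).1
  · obtain ⟨y, hy, hxy⟩ := (gt_bstate_iff _ _ hne).mp hgt
    rw [decide_eq_true hgt, List.any_eq_true]
    exact ⟨y, hy, by simpa using hxy⟩
  · rw [decide_eq_false hgt, List.any_eq_false]
    intro y hy
    simp only [decide_eq_true_eq]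
    intro hxy
    exact hgt ((gt_bstate_iff _ _ hne).mpr ⟨y, hy, hxy⟩)

-- ===== VERDICT (by name: the statement is the Claim_ definition above) =====
theorem check_spec : Claim_equal_check := by
  intro arr k _ hpre
  unfold Spec_check
  exact check_eq_alt arr k hpre.1 hpre.2
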